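-- pv_equiv track=rewrite | github.com/joehz2007/pdf-convert | src/pdf_extract/metadata_builder.py | _bracket_balance
-- ===== SOURCE A (Python) =====
-- def _bracket_balance(text: str) -> int:
--     """Return the net open-bracket count for code text.
--
--     Positive means there are unclosed openers ({, [, ().
--     Only counts brackets outside of quoted strings (simple heuristic).
--     """
--     balance = 0
--     in_string = False
--     escape = False
--     quote_char = ""
--     for ch in text:
--         if escape:
--             escape = False
--             continue
--         if ch == "\\":
--             escape = True
--             continue
--         if in_string:
--             if ch == quote_char:
--                 in_string = False
--             continue
--         if ch in ('"', "'"):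
--             in_string = True
--             quote_char = ch
--             continue
--         if ch in "{[(":
--             balance += 1
--         elif ch in "}])":
--             balance -= 1
--     return balance
-- ===== SOURCE B (Python) =====
-- def _bracket_balance(text: str) -> int:
--     """Token-consuming index scan: escape pairs and whole quoted strings are
--     consumed as units, then brackets are tallied on what remains."""
--     i, n, balance = 0, len(text), 0
--     while i < n:
--         c = text[i]
--         if c == "\\":
--             i += 2
--         elif c in ('"', "'"):
--             j = i + 1
--             while j < n and text[j] != c:
--                 j += 2 if text[j] == "\\" else 1
--             i = j + 1
--         else:
--             if c in "{[(":
--                 balance += 1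
--             elif c in "}])":
--                 balance -= 1
--             i += 1
--     return balance
-- ===== Notes on version B (the rewrite author's own statement) =====
-- stated objective: alternative
-- what changed: Replaces the per-character boolean state machine (escape/in_string/quote_char flags) with an index-advancing token scan that consumes backslash-escape pairs and whole quoted string literals as units in an inner loop, tallying brackets only on the remaining top-level characters.
import Mathlib
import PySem

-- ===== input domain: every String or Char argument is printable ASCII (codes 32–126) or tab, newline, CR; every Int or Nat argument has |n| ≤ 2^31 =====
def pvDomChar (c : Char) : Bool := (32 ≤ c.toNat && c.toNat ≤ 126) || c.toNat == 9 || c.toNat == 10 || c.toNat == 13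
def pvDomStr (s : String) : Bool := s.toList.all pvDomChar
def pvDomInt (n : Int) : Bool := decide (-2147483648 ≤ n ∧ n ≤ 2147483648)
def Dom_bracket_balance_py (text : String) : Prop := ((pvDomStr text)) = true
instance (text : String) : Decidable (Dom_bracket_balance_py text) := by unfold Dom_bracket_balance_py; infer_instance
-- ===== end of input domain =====

-- B replaces A's flag-based state machine with a token-consuming scan (escape pairs and whole
-- string literals consumed as units); same O(n) cost, proved to return the same value.

-- ===== PORT A =====
-- A's loop state: balance, in_string, escape, quote_char. quote_char starts as "" in Python and
-- is only ever compared while in_string (when it holds a real quote char), so it is a Char here.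
def goA (l : List Char) (bal : Int) (inStr esc : Bool) (q : Char) : Int :=
  match l with
  | [] => bal
  | c :: rest =>
    if esc then goA rest bal inStr false q
    else if c == '\\' then goA rest bal inStr true q
    else if inStr then
      (if c == q then goA rest bal false false q else goA rest bal true false q)
    else if c == '"' || c == '\'' then goA rest bal true false c
    else if c == '{' || c == '[' || c == '(' then goA rest (bal + 1) inStr false q
    else if c == '}' || c == ']' || c == ')' then goA rest (bal - 1) inStr false q
    else goA rest bal inStr false q

def bracket_balance_py (text : String) : Int :=
  goA text.toList 0 false false ' '

-- ===== PORT B =====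
-- inner while loop of B: skip to just past the closing quote q (or to the end)
def skipString (q : Char) (l : List Char) : List Char :=
  match l with
  | [] => []
  | c :: rest =>
    if c == q then rest
    else if c == '\\' then skipString q rest.tail
    else skipString q rest
termination_by l.length
decreasing_by
  · have := List.length_tail (l := rest); simp only [List.length_cons]; omega
  · simp

theorem skipString_length (q : Char) (l : List Char) : (skipString q l).length ≤ l.length := by
  induction l using skipString.induct q with
  | case1 => simp [skipString]
  | case2 c rest h =>
    simp only [skipString, if_pos h]; simp
  | case3 c rest h1 h2 ih =>
    simp only [skipString, if_neg h1, if_pos h2, List.length_cons]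
    have := List.length_tail (l := rest); omega
  | case4 c rest h1 h2 ih =>
    simp only [skipString, if_neg h1, if_neg h2, List.length_cons]; omega

def goB (l : List Char) (bal : Int) : Int :=
  match l with
  | [] => bal
  | c :: rest =>
    if c == '\\' then goB rest.tail bal
    else if c == '"' || c == '\'' then goB (skipString c rest) bal
    else if c == '{' || c == '[' || c == '(' then goB rest (bal + 1)
    else if c == '}' || c == ']' || c == ')' then goB rest (bal - 1)
    else goB rest bal
termination_by l.length
decreasing_by
  · have := List.length_tail (l := rest); simp only [List.length_cons]; omega
  · have := skipString_length c rest; simp only [List.length_cons]; omega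
  all_goals simp

def bracket_balance_py_alt (text : String) : Int :=
  goB text.toList 0

-- ===== PRECONDITION & SPEC =====
def Spec_bracket_balance_py (text : String) (out : Int) : Prop := out = bracket_balance_py_alt text
instance (text : String) (out : Int) : Decidable (Spec_bracket_balance_py text out) := by unfold Spec_bracket_balance_py; infer_instance

-- ===== CLAIM (what is proved, stated in full; the proofs are below) =====
def Claim_equal_bracket_balance_py : Prop := ∀ (text : String), Dom_bracket_balance_py text → Spec_bracket_balance_py text (bracket_balance_py text)

-- ===== LEMMAS AND PROOFS =====

-- One step of A while a backslash escape is pending: the next char (if any) is consumed unchanged.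
theorem goA_escape (l : List Char) (bal : Int) (inStr : Bool) (q : Char) :
    goA l bal inStr true q = goA l.tail bal inStr false q := by
  cases l with
  | nil => simp [goA]
  | cons c rest => simp [goA]

-- Combined invariant: A's state machine equals B's token scan, in normal mode (part 1)
-- and in string mode with the string-skipping loop (part 2).
theorem goA_goB_aux (n : Nat) : ∀ (l : List Char) (bal : Int) (q : Char), l.length ≤ n →
    (goA l bal false false q = goB l bal) ∧
    (q ≠ '\\' → goA l bal true false q = goB (skipString q l) bal) := by
  induction n with
  | zero =>
    intro l bal q hl
    have : l = [] := by cases l <;> simp_all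
    subst this; simp [goA, goB, skipString]
  | succ n ih =>
    intro l bal q hl
    match l with
    | [] => simp [goA, goB, skipString]
    | c :: rest =>
      have hrest : rest.length ≤ n := by simp at hl; omega
      have htail : rest.tail.length ≤ n := by
        have := List.length_tail (l := rest); omega
      have hskip : ∀ q', (skipString q' rest).length ≤ n :=
        fun q' => le_trans (skipString_length q' rest) hrest
      constructor
      · -- normal mode
        by_cases h1 : c = '\\'
        · subst h1
          have e1 : goA ('\\' :: rest) bal false false q = goA rest.tail bal false false q := by
            simp [goA, goA_escape]
          have e2 : goB ('\\' :: rest) bal = goB rest.tail bal := by simp [goB]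
          rw [e1, e2]; exact (ih rest.tail bal q htail).1
        · by_cases h2 : c = '"' ∨ c = '\''
          · have hq' : c ≠ '\\' := h1
            have e1 : goA (c :: rest) bal false false q = goA rest bal true false c := by
              rcases h2 with h | h <;> subst h <;> simp [goA]
            have e2 : goB (c :: rest) bal = goB (skipString c rest) bal := by
              rcases h2 with h | h <;> subst h <;> simp [goB]
            rw [e1, e2]
            exact (ih rest bal c hrest).2 hq'
          · push Not at h2
            by_cases h3 : c = '{' ∨ c = '[' ∨ c = '('
            · have e1 : goA (c :: rest) bal false false q = goA rest (bal + 1) false false q := by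
                rcases h3 with h | h | h <;> subst h <;> simp [goA]
              have e2 : goB (c :: rest) bal = goB rest (bal + 1) := by
                rcases h3 with h | h | h <;> subst h <;> simp [goB]
              rw [e1, e2]; exact (ih rest (bal + 1) q hrest).1
            · by_cases h4 : c = '}' ∨ c = ']' ∨ c = ')'
              · have e1 : goA (c :: rest) bal false false q = goA rest (bal - 1) false false q := by
                  rcases h4 with h | h | h <;> subst h <;> simp [goA]
                have e2 : goB (c :: rest) bal = goB rest (bal - 1) := by
                  rcases h4 with h | h | h <;> subst h <;> simp [goB]
                rw [e1, e2]; exact (ih rest (bal - 1) q hrest).1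
              · push Not at h3; push Not at h4
                have e1 : goA (c :: rest) bal false false q = goA rest bal false false q := by
                  simp [goA, h1, h2.1, h2.2, h3.1, h3.2.1, h3.2.2, h4.1, h4.2.1, h4.2.2]
                have e2 : goB (c :: rest) bal = goB rest bal := by
                  simp [goB, h1, h2.1, h2.2, h3.1, h3.2.1, h3.2.2, h4.1, h4.2.1, h4.2.2]
                rw [e1, e2]; exact (ih rest bal q hrest).1
      · -- string mode
        intro hq
        by_cases h1 : c = '\\'
        · subst h1
          have e1 : goA ('\\' :: rest) bal true false q = goA rest.tail bal true false q := by
            simp [goA, goA_escape]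
          have hne : ('\\' : Char) ≠ q := fun h => hq h.symm
          have e2 : skipString q ('\\' :: rest) = skipString q rest.tail := by
            simp [skipString, hne]
          rw [e1, e2]; exact (ih rest.tail bal q htail).2 hq
        · by_cases h2 : c = q
          · subst h2
            have e1 : goA (c :: rest) bal true false c = goA rest bal false false c := by
              simp [goA, h1]
            have e2 : skipString c (c :: rest) = rest := by simp [skipString]
            rw [e1, e2]; exact (ih rest bal c hrest).1
          · have e1 : goA (c :: rest) bal true false q = goA rest bal true false q := by
              simp [goA, h1, h2]
            have e2 : skipString q (c :: rest) = skipString q rest := by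
              simp [skipString, h1, h2]
            rw [e1, e2]; exact (ih rest bal q hrest).2 hq

-- ===== VERDICT (by name: the statement is the Claim_ definition above) =====
theorem bracket_balance_py_spec : Claim_equal_bracket_balance_py := by
  intro text _
  unfold Spec_bracket_balance_py bracket_balance_py bracket_balance_py_alt
  exact (goA_goB_aux text.toList.length text.toList 0 ' ' (le_refl _)).1
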